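-- pv_equiv track=rewrite | github.com/Harjacober/CodeforcesSolvedProblems | FrogJumps.py | jumps
-- ===== SOURCE A (Python) =====
-- def jumps(path):
--     ans,count = 0,1
--     for e in path[::-1]:
--         if e!= 'R':
--             count += 1
--         else: count = 1
--         ans = max(ans, count)
--     return ans
-- ===== SOURCE B (Python) =====
-- def jumps(path):
--     if not path:
--         return 0
--     return max(len(s) for s in path.split('R')) + 1
-- ===== Notes on version B (the rewrite author's own statement) =====
-- stated objective: simpler
-- what changed: Replaces the reversed-scan running-counter state machine with splitting the string on the blocking character into maximal runs and returning the maximum run length plus one (0 for the empty string).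
import Mathlib
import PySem

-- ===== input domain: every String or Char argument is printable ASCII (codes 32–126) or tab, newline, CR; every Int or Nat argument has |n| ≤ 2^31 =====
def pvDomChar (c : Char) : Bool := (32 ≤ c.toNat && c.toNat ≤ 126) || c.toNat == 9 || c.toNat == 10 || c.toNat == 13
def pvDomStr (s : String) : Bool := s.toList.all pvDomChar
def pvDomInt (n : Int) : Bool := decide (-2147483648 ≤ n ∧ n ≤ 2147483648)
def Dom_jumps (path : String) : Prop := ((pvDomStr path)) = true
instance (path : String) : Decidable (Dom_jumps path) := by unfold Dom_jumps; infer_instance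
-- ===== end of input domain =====

-- B replaces A's reversed-scan running-counter state machine with split-on-'R' and a max over run lengths (same value, same O(n) cost; objective: simpler).

-- ===== PORT A =====
-- one loop step: if e != 'R': count += 1 else: count = 1; ans = max(ans, count)
def jumpsStep (s : Int × Int) (e : Char) : Int × Int :=
  if e ≠ 'R' then (max s.1 (s.2 + 1), s.2 + 1) else (max s.1 1, 1)

def jumps (path : String) : Int :=
  -- path[::-1]: step -1 ≠ 0, so slice? is always `some`
  let rev := (PySem.Str.slice? path none none (-1)).getD ""
  (rev.toList.foldl jumpsStep (0, 1)).1

-- ===== PORT B =====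
def jumps_alt (path : String) : Int :=
  if path = "" then 0
  else
    -- path.split('R'): sep ≠ "", so split? is always `some`; the segment list is never empty, so max? is always `some`
    let segs := (PySem.Str.split? path "R").getD []
    (PySem.List.max? (segs.map PySem.Str.len) (fun y => y)).getD 0 + 1

-- ===== PRECONDITION & SPEC =====
def Spec_jumps (path : String) (out : Int) : Prop := out = jumps_alt path
instance (path : String) (out : Int) : Decidable (Spec_jumps path out) := by unfold Spec_jumps; infer_instance

-- ===== CLAIM (what is proved, stated in full; the proofs are below) =====
def Claim_equal_jumps : Prop := ∀ (path : String), Dom_jumps path → Spec_jumps path (jumps path)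

-- ===== LEMMAS AND PROOFS =====

-- reference splitter: maximal 'R'-separated segments of a char list (always nonempty)
def mysplit : List Char → List (List Char)
  | [] => [[]]
  | c :: rest =>
    if c = 'R' then [] :: mysplit rest
    else
      match mysplit rest with
      | [] => [[c]]
      | h :: t => (c :: h) :: t

theorem mysplit_ne_nil (l : List Char) : mysplit l ≠ [] := by
  cases l with
  | nil => simp [mysplit]
  | cons c rest =>
    simp only [mysplit]
    split
    · simp
    · cases h : mysplit rest <;> simp

-- prepend a prefix onto the first segment
def consHead (p : List Char) : List (List Char) → List (List Char)
  | [] => [p]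
  | h :: t => (p ++ h) :: t

theorem go_charR (fuel : Nat) :
    ∀ (l cur : List Char) (acc : List (List Char)), l.length < fuel →
      PySem.Chars.splitOn.go ['R'] fuel l cur acc =
        acc.reverse ++ consHead cur.reverse (mysplit l) := by
  induction fuel with
  | zero => intro l cur acc h; omega
  | succ f ih =>
    intro l cur acc h
    cases l with
    | nil =>
      simp [PySem.Chars.splitOn.go, mysplit, consHead]
    | cons c rest =>
      rw [PySem.Chars.splitOn.go]
      by_cases hc : c = 'R'
      · subst hc
        simp only [List.isPrefixOf, List.length_cons] at *
        rw [if_pos (by simp)]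
        simp only [List.length_nil, List.drop_succ_cons, List.drop_zero]
        rw [ih rest [] (cur.reverse :: acc) (by simpa using Nat.lt_of_succ_lt_succ h)]
        simp [mysplit]
        cases hms : mysplit rest with
        | nil => exact absurd hms (mysplit_ne_nil rest)
        | cons hseg t => simp [consHead]
      · rw [if_neg (by simp [List.isPrefixOf]; intro he; exact absurd he.symm hc)]
        rw [ih rest (c :: cur) acc (by simpa using Nat.lt_of_succ_lt_succ h)]
        simp only [mysplit, if_neg hc, List.reverse_cons]
        cases hms : mysplit rest with
        | nil => exact absurd hms (mysplit_ne_nil rest)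
        | cons hseg t => simp [consHead]

theorem splitOn_eq_mysplit (l : List Char) :
    PySem.Chars.splitOn l ['R'] = mysplit l := by
  unfold PySem.Chars.splitOn
  rw [go_charR (l.length + 1) l [] [] (by omega)]
  cases hms : mysplit l with
  | nil => exact absurd hms (mysplit_ne_nil l)
  | cons h t => simp [consHead]

-- running max over segment lengths
def ML (ss : List (List Char)) : Int := (ss.map (fun s => (s.length : Int))).foldl max 0

theorem foldl_max_max (ls : List Int) : ∀ (x y : Int),
    ls.foldl max (max x y) = max x (ls.foldl max y) := by
  induction ls with
  | nil => intro x y; simp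
  | cons a ls ih =>
    intro x y
    simp only [List.foldl_cons]
    rw [max_assoc, ih]

theorem ML_cons (s : List Char) (t : List (List Char)) :
    ML (s :: t) = max (s.length : Int) (ML t) := by
  unfold ML
  simp only [List.map_cons, List.foldl_cons]
  rw [max_comm, foldl_max_max]

theorem ML_nonneg (ss : List (List Char)) : 0 ≤ ML ss := by
  induction ss with
  | nil => simp [ML]
  | cons s t ih => rw [ML_cons]; positivity

-- the loop invariant: A's foldr over the original list (= foldl over the reversed list)
theorem foldr_inv (l : List Char) :
    (l.foldr (fun e s => jumpsStep s e) (0, 1)).2 = 1 + ((mysplit l).headI.length : Int) ∧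
    (l.foldr (fun e s => jumpsStep s e) (0, 1)).1 =
      if l = [] then 0 else 1 + ML (mysplit l) := by
  induction l with
  | nil => constructor <;> simp [mysplit]
  | cons e rest ih =>
    obtain ⟨ih2, ih1⟩ := ih
    rw [List.foldr_cons]
    set p := List.foldr (fun e s => jumpsStep s e) (0, 1) rest with hp
    cases hms : mysplit rest with
    | nil => exact absurd hms (mysplit_ne_nil rest)
    | cons h t =>
      rw [hms] at ih1 ih2
      simp only [List.headI] at ih2
      by_cases he : e = 'R'
      · subst he
        simp only [jumpsStep, if_neg (by simp : ¬('R' ≠ 'R'))]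
        have hsp : mysplit ('R' :: rest) = [] :: h :: t := by
          simp [mysplit, hms]
        refine ⟨by simp [hsp], ?_⟩
        rw [hsp, if_neg (by simp), ML_cons]
        have h0 := ML_nonneg (h :: t)
        simp only [List.length_nil, Int.ofNat_zero]
        by_cases hrest : rest = []
        · subst hrest
          rw [if_pos rfl] at ih1
          have hht : ([] : List Char) :: [] = h :: t := by simpa [mysplit] using hms
          cases hht
          have hml : ML ([] :: ([] : List (List Char))) = 0 := by simp [ML]
          rw [ML_cons] at hml ⊢
          omega
        · rw [if_neg hrest] at ih1
          omega
      · simp only [jumpsStep, if_pos (show e ≠ 'R' from he)]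
        have hsp : mysplit (e :: rest) = (e :: h) :: t := by
          simp [mysplit, he, hms]
        refine ⟨?_, ?_⟩
        · rw [hsp]
          simp only [List.headI, List.length_cons]
          rw [ih2]; push_cast; ring
        · rw [hsp, if_neg (by simp), ML_cons]
          have h0 := ML_nonneg t
          simp only [List.length_cons]
          by_cases hrest : rest = []
          · subst hrest
            rw [if_pos rfl] at ih1
            have : ([] : List Char) :: [] = h :: t := by simpa [mysplit] using hms
            cases this
            have hml : ML ([] : List (List Char)) = 0 := by simp [ML]
            omega
          · rw [if_neg hrest, ML_cons] at ih1
            push_cast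
            omega

theorem foldl_max_of_nonneg (tl : List Int) (x : Int) (hx : 0 ≤ x) :
    tl.foldl max x = max x (tl.foldl max 0) := by
  have := foldl_max_max tl x 0
  rwa [max_eq_left hx] at this

-- ===== VERDICT (by name: the statement is the Claim_ definition above) =====
theorem jumps_spec : Claim_equal_jumps := by
  intro path _
  unfold Spec_jumps jumps jumps_alt
  rw [PySem.Str.slice?_none_none_neg_one]
  simp only [Option.getD_some]
  rw [show (String.ofList path.toList.reverse).toList = path.toList.reverse by simp]
  rw [List.foldl_reverse]
  obtain ⟨_, h1⟩ := foldr_inv path.toList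
  rw [h1]
  by_cases hnil : path = ""
  · subst hnil; simp
  · have hln : path.toList ≠ [] := by
      simpa [← String.toList_eq_nil_iff] using hnil
    rw [if_neg hln, if_neg hnil]
    have hsplit : PySem.Str.split? path "R" =
        some ((mysplit path.toList).map String.ofList) := by
      unfold PySem.Str.split? PySem.Chars.split?
      rw [if_neg (by decide)]
      rw [show ("R" : String).toList = ['R'] by decide]
      rw [splitOn_eq_mysplit]
      rfl
    rw [hsplit]
    simp only [Option.getD_some, List.map_map]
    have hmap : (mysplit path.toList).map (PySem.Str.len ∘ String.ofList) =
        (mysplit path.toList).map (fun s => (s.length : Int)) := by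
      apply List.map_congr_left
      intro s _
      simp [PySem.Str.len]
    rw [hmap]
    cases hms : mysplit path.toList with
    | nil => exact absurd hms (mysplit_ne_nil _)
    | cons h t =>
      simp only [List.map_cons]
      rw [PySem.List.max?_id_cons]
      simp only [Option.getD_some]
      rw [foldl_max_of_nonneg _ _ (by positivity)]
      rw [ML_cons]
      show 1 + max (↑h.length) (ML t) = max (↑h.length) (ML t) + 1
      ring
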